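-- pv_equiv track=rewrite | github.com/AngieCCo/AngieCCo | printer_error_improved.py | printer_errors
-- ===== SOURCE A (Python) =====
-- def printer_errors(s):
--
--     good_letters = "a", "b", "c", "d", "e", "f", "g", "h", "i", "j", "k", "l", "m"
--     count_letters = 0
--     count_total = len(s)
--
--     for letter in s:
--         its_good_letter = None
--         for good_letter in good_letters:
--             if good_letter == letter:
--                 its_good_letter = True
--         if its_good_letter is None:
--             its_good_letter = False
--
--         if its_good_letter:
--             count_letters += 0
--         else:
--             count_letters += 1
--
--     result = f"{count_letters}/{count_total}"
--
--     return result
-- ===== SOURCE B (Python) =====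
-- def printer_errors(s):
--     counts = {}
--     for c in s:
--         counts[c] = counts.get(c, 0) + 1
--     bad = sum(v for k, v in counts.items() if not ('a' <= k <= 'm'))
--     return f"{bad}/{len(s)}"
-- ===== Notes on version B (the rewrite author's own statement) =====
-- stated objective: alternative
-- what changed: Builds a character-frequency dictionary in one grouping pass and then sums the frequencies of the distinct bad characters, instead of A's per-character nested scan over a 13-letter tuple with an Option flag.
import Mathlib
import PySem

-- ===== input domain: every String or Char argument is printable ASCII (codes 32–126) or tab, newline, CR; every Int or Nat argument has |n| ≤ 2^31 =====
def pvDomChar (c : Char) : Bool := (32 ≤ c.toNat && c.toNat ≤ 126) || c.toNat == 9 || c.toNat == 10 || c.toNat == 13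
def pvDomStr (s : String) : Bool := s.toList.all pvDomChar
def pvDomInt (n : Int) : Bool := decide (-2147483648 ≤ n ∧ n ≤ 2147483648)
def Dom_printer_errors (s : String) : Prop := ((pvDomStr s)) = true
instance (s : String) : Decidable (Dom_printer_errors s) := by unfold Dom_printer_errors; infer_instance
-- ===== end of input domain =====

-- ===== PORT A =====
-- B groups the string into a character-frequency dictionary and sums the frequencies of
-- the distinct bad characters, instead of A's per-character nested scan (objective: alternative).
def pvGoodLetters : List Char :=
  ['a', 'b', 'c', 'd', 'e', 'f', 'g', 'h', 'i', 'j', 'k', 'l', 'm']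

-- the body of A's outer loop, step for step
def pvStepA (count_letters : Int) (letter : Char) : Int :=
  let its_good_letter0 : Option Bool :=
    pvGoodLetters.foldl (fun its_good_letter good_letter =>
      if good_letter == letter then some true else its_good_letter) none
  let its_good_letter : Bool :=
    match its_good_letter0 with
    | none => false
    | some b => b
  if its_good_letter then count_letters + 0 else count_letters + 1

def printer_errors (s : String) : String :=
  let count_total : Int := PySem.Str.len s
  let count_letters : Int := s.toList.foldl pvStepA 0
  PySem.Int.toStr count_letters ++ "/" ++ PySem.Int.toStr count_total

-- ===== PORT B =====
def printer_errors_alt (s : String) : String :=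
  let counts : PySem.Dict Char Int :=
    s.toList.foldl (fun d c => d.insert c (d.getD c 0 + 1)) PySem.Dict.empty
  let bad : Int :=
    counts.items.foldl (fun acc kv =>
      if !('a' ≤ kv.1 && kv.1 ≤ 'm') then acc + kv.2 else acc) 0
  PySem.Int.toStr bad ++ "/" ++ PySem.Int.toStr (PySem.Str.len s)

-- ===== PRECONDITION & SPEC =====
def Spec_printer_errors (s : String) (out : String) : Prop := out = printer_errors_alt s
instance (s : String) (out : String) : Decidable (Spec_printer_errors s out) := by unfold Spec_printer_errors; infer_instance

-- ===== CLAIM (what is proved, stated in full; the proofs are below) =====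
def Claim_equal_printer_errors : Prop := ∀ (s : String), Dom_printer_errors s → Spec_printer_errors s (printer_errors s)

-- ===== LEMMAS AND PROOFS =====

def pvBad (c : Char) : Bool := !('a' ≤ c && c ≤ 'm')

-- A's inner scan leaves `some true` exactly when the letter is in the list.
theorem pvInnerTrue (letter : Char) (u : List Char) :
    u.foldl (fun its_good_letter good_letter =>
      if good_letter == letter then some true else its_good_letter) (some true) = some true := by
  induction u with
  | nil => rfl
  | cons g u' ih =>
    simp only [List.foldl_cons, ite_self]
    exact ih

theorem pvInnerScan (letter : Char) (u : List Char) (st : Option Bool) :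
    u.foldl (fun its_good_letter good_letter =>
      if good_letter == letter then some true else its_good_letter) st
      = if letter ∈ u then some true else st := by
  induction u generalizing st with
  | nil => simp
  | cons g u' ih =>
    simp only [List.foldl_cons]
    by_cases hg : g = letter
    · subst hg
      rw [if_pos (by simp), pvInnerTrue]
      simp
    · rw [if_neg (by simp [hg]), ih]
      simp [Ne.symm hg]

-- membership in the 13-letter list is the contiguous range test
theorem pvMemGood (c : Char) : (c ∈ pvGoodLetters) ↔ ('a' ≤ c ∧ c ≤ 'm') := by
  have hval : ∀ d : Char, c = d ↔ c.val.toNat = d.val.toNat := by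
    intro d
    constructor
    · intro h; rw [h]
    · intro h; exact Char.ext (UInt32.toNat_inj.mp h)
  simp only [pvGoodLetters, List.mem_cons, List.not_mem_nil, or_false,
    Char.le_def, UInt32.le_iff_toNat_le, hval]
  have ha : ('a' : Char).val.toNat = 97 := by decide
  have hm : ('m' : Char).val.toNat = 109 := by decide
  have hb : ('b' : Char).val.toNat = 98 := by decide
  have hc : ('c' : Char).val.toNat = 99 := by decide
  have hd : ('d' : Char).val.toNat = 100 := by decide
  have he : ('e' : Char).val.toNat = 101 := by decide
  have hf : ('f' : Char).val.toNat = 102 := by decide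
  have hg : ('g' : Char).val.toNat = 103 := by decide
  have hh : ('h' : Char).val.toNat = 104 := by decide
  have hi : ('i' : Char).val.toNat = 105 := by decide
  have hj : ('j' : Char).val.toNat = 106 := by decide
  have hk : ('k' : Char).val.toNat = 107 := by decide
  have hl : ('l' : Char).val.toNat = 108 := by decide
  omega

-- A's per-character step increments exactly on bad characters.
theorem pvStepA_eq (acc : Int) (c : Char) :
    pvStepA acc c = if pvBad c then acc + 1 else acc := by
  unfold pvStepA pvBad
  rw [pvInnerScan]
  by_cases h : c ∈ pvGoodLetters
  · have hr : ('a' ≤ c ∧ c ≤ 'm') := (pvMemGood c).mp h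
    have : ('a' ≤ c && c ≤ 'm') = true := by simp [hr.1, hr.2]
    simp [h, this]
  · have hr := (pvMemGood c).not.mp h
    have : ('a' ≤ c && c ≤ 'm') = false := by
      by_contra hx
      rw [Bool.not_eq_false, Bool.and_eq_true, decide_eq_true_iff, decide_eq_true_iff] at hx
      exact hr hx
    simp [h, this]

-- summing the counts of the distinct bad elements of l over any nodup cover = countP
theorem pvSumCounts (p : Char → Bool) (u l : List Char)
    (hu : u.Nodup) (hl : ∀ x ∈ l, p x = true → x ∈ u) :
    (u.map (fun k => if p k then (l.count k : Int) else 0)).sum = (l.countP p : Int) := by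
  induction u generalizing l with
  | nil =>
    have : l.countP p = 0 := by
      rw [List.countP_eq_zero]
      intro x hx
      by_contra hpx
      exact absurd (hl x hx (by simpa using hpx)) (List.not_mem_nil)
    simp [this]
  | cons a u' ih =>
    have hnd := List.nodup_cons.mp hu
    have h2 : (l.filter (fun x => x == a)).countP p = if p a = true then l.count a else 0 := by
      rw [List.filter_beq]
      by_cases hp : p a = true
      · simp only [hp, if_true]
        induction l.count a with
        | zero => simp
        | succ n ihn => simp [List.replicate_succ, hp, ihn]
      · rw [if_neg hp, List.countP_eq_zero]
        intro x hx
        rw [List.eq_of_mem_replicate hx]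
        simpa using hp
    have h1 : l.countP p = (l.filter (fun x => x == a)).countP p
        + (l.filter (fun x => !(x == a))).countP p := by
      have hperm := List.filter_append_perm (fun x => (x == a)) l
      calc l.countP p = ((l.filter (fun x => x == a)) ++ (l.filter (fun x => !(x == a)))).countP p :=
              (hperm.countP_eq p).symm
        _ = _ := by rw [List.countP_append]
    rw [List.map_cons, List.sum_cons]
    have hmap : u'.map (fun k => if p k = true then (l.count k : Int) else 0)
        = u'.map (fun k => if p k = true then ((l.filter (fun x => !(x == a))).count k : Int) else 0) := by
      apply List.map_congr_left
      intro k hk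
      have hka : k ≠ a := fun h => hnd.1 (h ▸ hk)
      have : (l.filter (fun x => !(x == a))).count k = l.count k := by
        apply List.count_filter
        simp [hka]
      rw [this]
    have hrest := ih (l.filter (fun x => !(x == a))) hnd.2 (by
      intro x hx hpx
      rw [List.mem_filter] at hx
      have hxa : x ≠ a := by simpa using hx.2
      have := hl x hx.1 hpx
      simpa [hxa] using this)
    rw [hmap, hrest, h1, h2]
    by_cases hp : p a = true <;> simp [hp]

-- an if-guarded accumulating fold is the sum of the guarded values
theorem pvFoldIfAdd (p : Char → Bool) (f : Char → Int) (u : List Char) (a : Int) :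
    u.foldl (fun acc k => if p k then acc + f k else acc) a
      = a + (u.map (fun k => if p k then f k else 0)).sum := by
  induction u generalizing a with
  | nil => simp
  | cons k u' ih =>
    by_cases h : p k = true <;> simp [h, ih, add_assoc]

-- ===== VERDICT (by name: the statement is the Claim_ definition above) =====
theorem printer_errors_spec : Claim_equal_printer_errors := by
  intro s _
  unfold Spec_printer_errors
  simp only [printer_errors, printer_errors_alt]
  have hA : s.toList.foldl pvStepA 0 = (s.toList.countP pvBad : Int) := by
    have : s.toList.foldl pvStepA 0
        = s.toList.foldl (fun acc c => if pvBad c then acc + 1 else acc) 0 := by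
      apply PySem.List.foldl_congr_mem
      intro acc c _
      exact pvStepA_eq acc c
    rw [this, PySem.List.foldl_if_add_one, zero_add]
  have hB : (s.toList.foldl (fun d c => d.insert c (d.getD c 0 + 1)) PySem.Dict.empty).items.foldl
      (fun acc kv => if !('a' ≤ kv.1 && kv.1 ≤ 'm') then acc + kv.2 else acc) 0
      = (s.toList.countP pvBad : Int) := by
    rw [PySem.Dict.foldl_insert_getD_add_one_eq_counter, PySem.Dict.items_counter]
    rw [List.foldl_map]
    have heq : (fun (acc : Int) (k : Char) => if !('a' ≤ k && k ≤ 'm') then acc + (s.toList.count k : Int) else acc)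
        = fun acc k => if pvBad k then acc + (s.toList.count k : Int) else acc := rfl
    rw [heq, pvFoldIfAdd, zero_add]
    exact pvSumCounts pvBad (PySem.Set.ofList s.toList) s.toList
      (PySem.Set.nodup_ofList _) (fun x hx _ => (PySem.Set.mem_ofList _ _).mpr hx)
  rw [hA, hB]
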